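-- pv_equiv track=rewrite | github.com/SuperDZ/pgx-mysql-migration-demo | banktel/sql_runner.py | _split_named_queries
-- ===== SOURCE A (Python) =====
-- def _split_named_queries(content: str) -> dict[str, str]:
--     named_queries: dict[str, list[str]] = {}
--     current_name: str | None = None
--     current_lines: list[str] = []
--
--     for line in content.splitlines():
--         stripped = line.strip()
--         if stripped.startswith("-- name:"):
--             if current_name is not None:
--                 named_queries[current_name] = current_lines
--             current_name = stripped.split(":", 1)[1].strip()
--             current_lines = []
--         else:
--             current_lines.append(line)
--
--     if current_name is not None:
--         named_queries[current_name] = current_lines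
--
--     if not named_queries:
--         raise ValueError("No named SQL found. Use '-- name: query_id' blocks.")
--
--     return {k: "\n".join(v).strip() for k, v in named_queries.items()}
-- ===== SOURCE B (Python) =====
-- def _is_marker(line):
--     return line.strip().startswith("-- name:")
--
--
-- def _blocks(lines):
--     # lines is non-empty and lines[0] is a marker line
--     name = lines[0].strip().split(":", 1)[1].strip()
--     body = []
--     rest = lines[1:]
--     while rest and not _is_marker(rest[0]):
--         body.append(rest[0])
--         rest = rest[1:]
--     return [(name, body)] + (_blocks(rest) if rest else [])
--
--
-- def _split_named_queries(content: str) -> dict[str, str]: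
--     lines = content.splitlines()
--     while lines and not _is_marker(lines[0]):
--         lines = lines[1:]
--     if not lines:
--         raise ValueError("No named SQL found. Use '-- name: query_id' blocks.")
--     result: dict[str, str] = {}
--     for name, body in _blocks(lines):
--         result[name] = "\n".join(body).strip()
--     return result
-- ===== Notes on version B (the rewrite author's own statement) =====
-- stated objective: alternative
-- what changed: A threads one accumulator state machine (dict, current_name, current_lines) through every line; B first skips the preamble, then recursively decomposes the remaining lines into (name, body) blocks at marker positions and joins each block once.
import Mathlib
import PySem

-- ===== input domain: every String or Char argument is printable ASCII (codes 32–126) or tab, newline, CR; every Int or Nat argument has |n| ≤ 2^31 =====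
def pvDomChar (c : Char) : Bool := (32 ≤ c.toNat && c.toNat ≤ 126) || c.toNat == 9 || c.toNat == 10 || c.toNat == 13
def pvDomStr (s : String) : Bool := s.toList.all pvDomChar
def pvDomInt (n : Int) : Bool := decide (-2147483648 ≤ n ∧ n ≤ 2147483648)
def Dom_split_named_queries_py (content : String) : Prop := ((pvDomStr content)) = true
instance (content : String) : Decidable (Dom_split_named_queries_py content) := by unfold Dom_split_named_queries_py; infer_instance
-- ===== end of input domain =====

-- B replaces A's single-accumulator state machine by a recursive decomposition (skip the
-- preamble, then split the lines at marker positions into (name, body) blocks); objective: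
-- alternative structure, same cost.

-- ===== PORT A =====
-- one fold step of A's loop: state = (named_queries, current_name, current_lines)
def pvStepA (st : PySem.Dict String (List String) × Option String × List String)
    (line : String) : PySem.Dict String (List String) × Option String × List String :=
  let stripped := PySem.Str.strip line
  if PySem.Str.startswith stripped "-- name:" then
    let nq := match st.2.1 with
      | some n => st.1.insert n st.2.2
      | none => st.1
    (nq, some (PySem.Str.strip (PySem.List.pyGetD ((PySem.Str.splitMax? stripped ":" 1).getD []) 1 "")), [])
  else
    (st.1, st.2.1, st.2.2 ++ [line])

def split_named_queries_py (content : String) : List (String × String) :=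
  let st := (PySem.Str.splitlines content).foldl pvStepA (PySem.Dict.empty, none, [])
  let nq := match st.2.1 with
    | some n => st.1.insert n st.2.2
    | none => st.1
  -- final dict comprehension {k: "\n".join(v).strip() for k, v in named_queries.items()}
  (nq.items.foldl
    (fun d kv => d.insert kv.1 (PySem.Str.strip (PySem.Str.join "\n" kv.2)))
    PySem.Dict.empty).items

-- ===== PORT B =====
def pvIsMarkerB (line : String) : Bool :=
  PySem.Str.startswith (PySem.Str.strip line) "-- name:"

def pvNameOfB (line : String) : String :=
  PySem.Str.strip
    (PySem.List.pyGetD ((PySem.Str.splitMax? (PySem.Str.strip line) ":" 1).getD []) 1 "")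

-- the body-collecting while loop of _blocks: (body, rest)
def pvSpanBodyB : List String → List String × List String
  | [] => ([], [])
  | x :: xs =>
    if pvIsMarkerB x then ([], x :: xs)
    else
      let p := pvSpanBodyB xs
      (x :: p.1, p.2)

theorem pvSpanBodyB_snd_le : ∀ (xs : List String), (pvSpanBodyB xs).2.length ≤ xs.length
  | [] => Nat.le_refl _
  | x :: xs => by
    simp only [pvSpanBodyB]
    split
    · simp
    · exact Nat.le_succ_of_le (pvSpanBodyB_snd_le xs)

def pvBlocksB : List String → List (String × List String)
  | [] => []
  | l :: ls =>
    let p := pvSpanBodyB ls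
    (pvNameOfB l, p.1) :: pvBlocksB p.2
termination_by ls => ls.length
decreasing_by
  exact Nat.lt_succ_of_le (pvSpanBodyB_snd_le ls)

-- the preamble-skipping while loop
def pvSkipPreambleB : List String → List String
  | [] => []
  | l :: ls => if pvIsMarkerB l then l :: ls else pvSkipPreambleB ls

def split_named_queries_py_alt (content : String) : List (String × String) :=
  let lines := pvSkipPreambleB (PySem.Str.splitlines content)
  ((pvBlocksB lines).foldl
    (fun d nb => d.insert nb.1 (PySem.Str.strip (PySem.Str.join "\n" nb.2)))
    PySem.Dict.empty).items

-- ===== PRECONDITION & SPEC =====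
-- Pre_ excludes exactly the inputs containing no marker line, on which A raises ValueError.
def Pre_split_named_queries_py (content : String) : Prop :=
  (PySem.Str.splitlines content).any
    (fun l => PySem.Str.startswith (PySem.Str.strip l) "-- name:") = true
instance (content : String) : Decidable (Pre_split_named_queries_py content) := by
  unfold Pre_split_named_queries_py; infer_instance

def pvWitness_split_named_queries_py : String := "-- name: q1\nselect 1;\n-- name: q2\nselect 2;"

def Spec_split_named_queries_py (content : String) (out : List (String × String)) : Prop :=
  out = split_named_queries_py_alt content
instance (content : String) (out : List (String × String)) :
    Decidable (Spec_split_named_queries_py content out) := by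
  unfold Spec_split_named_queries_py; infer_instance

-- ===== CLAIM (what is proved, stated in full; the proofs are below) =====
def Claim_equal_split_named_queries_py : Prop :=
  ∀ (content : String), Dom_split_named_queries_py content →
    Pre_split_named_queries_py content →
      Spec_split_named_queries_py content (split_named_queries_py content)

-- ===== LEMMAS AND PROOFS =====

-- A's final insertion of the pending (current_name, current_lines) pair
def pvFinalA (st : PySem.Dict String (List String) × Option String × List String) :
    PySem.Dict String (List String) :=
  match st.2.1 with
  | some n => st.1.insert n st.2.2
  | none => st.1

-- raw-line insertion used on both sides of the structural lemmas
def pvInsRaw (d : PySem.Dict String (List String)) (p : String × List String) :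
    PySem.Dict String (List String) :=
  d.insert p.1 p.2

-- A's fold from a running block (current_name = some n) produces exactly B's blocks,
-- folded into the dictionary.
theorem pvFoldA_blocks : ∀ (ls : List String) (n : String) (cls : List String)
    (d : PySem.Dict String (List String)),
    pvFinalA (ls.foldl pvStepA (d, some n, cls)) =
      (((n, cls ++ (pvSpanBodyB ls).1) :: pvBlocksB (pvSpanBodyB ls).2).foldl pvInsRaw d)
  | [], n, cls, d => by
    simp [pvFinalA, pvSpanBodyB, pvBlocksB, pvInsRaw]
  | l :: ls, n, cls, d => by
    by_cases h : pvIsMarkerB l = true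
    · have hstep : pvStepA (d, some n, cls) l = (d.insert n cls, some (pvNameOfB l), []) := by
        simp [pvStepA, pvIsMarkerB, pvNameOfB] at h ⊢
        simp [h]
      have hspan : pvSpanBodyB (l :: ls) = ([], l :: ls) := by simp [pvSpanBodyB, h]
      rw [List.foldl_cons, hstep, pvFoldA_blocks ls (pvNameOfB l) [] (d.insert n cls), hspan]
      simp [pvBlocksB, pvInsRaw]
    · have hstep : pvStepA (d, some n, cls) l = (d, some n, cls ++ [l]) := by
        simp [pvStepA, pvIsMarkerB] at h ⊢
        simp [h]
      have hspan : pvSpanBodyB (l :: ls) =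
          (l :: (pvSpanBodyB ls).1, (pvSpanBodyB ls).2) := by
        simp [pvSpanBodyB, h]
      rw [List.foldl_cons, hstep, pvFoldA_blocks ls n (cls ++ [l]) d, hspan]
      simp

-- the preamble phase: with current_name = none and an empty dictionary, A's fold
-- discards lines up to the first marker, exactly like pvSkipPreambleB.
theorem pvFoldA_preamble : ∀ (ls : List String) (cls : List String),
    pvFinalA (ls.foldl pvStepA (PySem.Dict.empty, none, cls)) =
      (pvBlocksB (pvSkipPreambleB ls)).foldl pvInsRaw PySem.Dict.empty
  | [], cls => by simp [pvFinalA, pvSkipPreambleB, pvBlocksB]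
  | l :: ls, cls => by
    by_cases h : pvIsMarkerB l = true
    · have hstep : pvStepA (PySem.Dict.empty, none, cls) l =
          (PySem.Dict.empty, some (pvNameOfB l), []) := by
        simp [pvStepA, pvIsMarkerB, pvNameOfB] at h ⊢
        simp [h]
      rw [List.foldl_cons, hstep,
        pvFoldA_blocks ls (pvNameOfB l) [] PySem.Dict.empty]
      simp [pvSkipPreambleB, h, pvBlocksB]
    · have hstep : pvStepA (PySem.Dict.empty, none, cls) l =
          (PySem.Dict.empty, none, cls ++ [l]) := by
        simp [pvStepA, pvIsMarkerB] at h ⊢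
        simp [h]
      rw [List.foldl_cons, hstep, pvFoldA_preamble ls (cls ++ [l])]
      simp [pvSkipPreambleB, h]

-- finishing a block: "\n".join(v).strip()
def pvFin (v : List String) : String := PySem.Str.strip (PySem.Str.join "\n" v)

-- finishing a (name, body) item
def pvG (kv : String × List String) : String × String := (kv.1, pvFin kv.2)

-- value-mapping of the items list commutes with a single insert
theorem pvInsert_map (d : PySem.Dict String (List String)) (d' : PySem.Dict String String)
    (h : d'.items = d.items.map pvG) (k : String) (v : List String) :
    (d'.insert k (pvFin v)).items = (d.insert k v).items.map pvG := by
  have hkeys : d'.keys = d.keys := by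
    show d'.items.map (·.1) = d.items.map (·.1)
    rw [h, List.map_map]
    rfl
  have hcont : d'.contains k = d.contains k := by
    rw [PySem.Dict.contains_eq_decide_mem_keys, PySem.Dict.contains_eq_decide_mem_keys, hkeys]
  rw [PySem.Dict.items_insert, PySem.Dict.items_insert, hcont]
  by_cases hc : d.contains k = true
  · simp only [hc, if_true, h, List.map_map]
    refine List.map_congr_left ?_
    intro p _
    by_cases hp : (p.1 == k) = true
    · simp [pvG, Function.comp, hp]
    · simp [pvG, Function.comp, hp]
  · simp only [hc, h]
    simp [pvG]

-- value-mapping commutes with the whole insertion fold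
theorem pvFold_map : ∀ (bs : List (String × List String)) (d : PySem.Dict String (List String))
    (d' : PySem.Dict String String), d'.items = d.items.map pvG →
    (bs.foldl (fun d nb => d.insert nb.1 (pvFin nb.2)) d').items =
      (bs.foldl pvInsRaw d).items.map pvG
  | [], d, d', h => h
  | nb :: bs, d, d', h => by
    rw [List.foldl_cons, List.foldl_cons]
    exact pvFold_map bs (pvInsRaw d nb) (d'.insert nb.1 (pvFin nb.2))
      (pvInsert_map d d' h nb.1 nb.2)

-- A's closing dict comprehension maps pvFin over the values of a nodup-keyed dict
theorem pvComprehension (D : PySem.Dict String (List String)) (hnd : D.keys.Nodup) :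
    (D.items.foldl (fun d kv => d.insert kv.1 (pvFin kv.2)) PySem.Dict.empty).items =
      D.items.map pvG := by
  have := PySem.Dict.items_foldl_insert_fresh (ν := String) D.items Prod.fst
    (fun kv => pvFin kv.2) PySem.Dict.empty
    (by intro a _; simp [PySem.Dict.contains_empty]) hnd
  simpa [pvG] using this

-- keys of the raw-insertion fold stay unique
theorem pvNodupD (bs : List (String × List String)) :
    ((bs.foldl pvInsRaw PySem.Dict.empty).keys).Nodup := by
  have := PySem.Dict.nodup_keys_foldl_insert_key (ν := List String) bs
    (fun p => p.1) (fun _ p => p.2) PySem.Dict.empty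
    (by simp)
  exact this

-- ===== VERDICT (by name: the statement is the Claim_ definition above) =====
theorem split_named_queries_py_spec : Claim_equal_split_named_queries_py := by
  intro content _ _
  show Spec_split_named_queries_py content (split_named_queries_py content)
  show (List.foldl (fun d kv => d.insert kv.1 (pvFin kv.2)) PySem.Dict.empty
      (pvFinalA (List.foldl pvStepA (PySem.Dict.empty, none, [])
        (PySem.Str.splitlines content))).items).items =
    (List.foldl (fun d nb => d.insert nb.1 (pvFin nb.2)) PySem.Dict.empty
      (pvBlocksB (pvSkipPreambleB (PySem.Str.splitlines content)))).items
  rw [pvFoldA_preamble (PySem.Str.splitlines content) []]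
  rw [pvComprehension _ (pvNodupD _)]
  rw [pvFold_map _ PySem.Dict.empty PySem.Dict.empty rfl]
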